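-- pv_equiv track=rewrite | github.com/zaslotskyi/QA__ | lesson15.py | sum_and_product
-- ===== SOURCE A (Python) =====
-- import math
--
-- def sum_and_product(min_value, max_value, lst):
--
--     new_list = [i for i in lst if i >= min_value and i <= max_value]
--
--     if len(new_list) > 0:
--         sum_ = sum(new_list)
--         product = math.prod(new_list)
--     else:
--         sum_ = None
--         product = None
--
--     return f"sum_ = {sum_}\nproduct = {product}"
-- ===== SOURCE B (Python) =====
-- def sum_and_product(min_value, max_value, lst):
--     # Frequency-dictionary approach: tally each value once, then combine each
--     # distinct in-range value v with multiplicity c via v*c and v**c.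
--     counts = {}
--     for i in lst:
--         counts[i] = counts.get(i, 0) + 1
--     total = 0
--     prod = 1
--     n = 0
--     for v, c in counts.items():
--         if min_value <= v <= max_value:
--             total += v * c
--             prod *= v ** c
--             n += c
--     if n == 0:
--         sum_ = None
--         product = None
--     else:
--         sum_ = total
--         product = prod
--     return f"sum_ = {sum_}\nproduct = {product}"
-- ===== Notes on version B (the rewrite author's own statement) =====
-- stated objective: alternative
-- what changed: Replaces A's filtered-list comprehension plus separate sum() and math.prod() passes with a frequency dictionary built once, combining each distinct in-range value v of multiplicity c via v*c and v**c.
import Mathlib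
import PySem

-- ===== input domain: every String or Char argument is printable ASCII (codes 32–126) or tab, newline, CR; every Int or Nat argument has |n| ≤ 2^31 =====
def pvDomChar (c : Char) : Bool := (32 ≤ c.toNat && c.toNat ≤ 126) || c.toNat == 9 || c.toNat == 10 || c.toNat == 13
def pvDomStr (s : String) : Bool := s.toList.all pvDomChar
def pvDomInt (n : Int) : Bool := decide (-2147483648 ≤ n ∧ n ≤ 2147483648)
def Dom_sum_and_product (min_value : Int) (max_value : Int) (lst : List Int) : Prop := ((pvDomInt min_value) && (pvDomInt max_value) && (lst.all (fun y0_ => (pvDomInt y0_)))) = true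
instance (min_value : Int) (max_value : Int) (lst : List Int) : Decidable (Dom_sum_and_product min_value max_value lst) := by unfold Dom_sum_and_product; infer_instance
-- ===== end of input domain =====

-- B replaces A's filtered-list + sum() + math.prod() passes by a frequency dictionary,
-- combining each distinct in-range value v of multiplicity c via v*c and v**c (alternative algorithm, similar cost).


-- ===== PORT A =====
-- literal port of A: build the filtered list, then sum() and math.prod() it separately
def sum_and_product (min_value : Int) (max_value : Int) (lst : List Int) : String :=
  let new_list := lst.filter (fun i => decide (i ≥ min_value) && decide (i ≤ max_value))
  let (sum_, product) :=
    if new_list.length > 0 then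
      (PySem.Int.toStr new_list.sum, PySem.Int.toStr new_list.prod)
    else
      ("None", "None")
  "sum_ = " ++ sum_ ++ "\nproduct = " ++ product

-- ===== PORT B =====
-- frequency dictionary: counts[i] = counts.get(i,0)+1, then per distinct value v with
-- multiplicity c: total += v*c, prod *= v**c, n += c.  v ** c ported as v ^ c.toNat,
-- exact here since every count c is nonnegative.
def sum_and_product_alt (min_value : Int) (max_value : Int) (lst : List Int) : String :=
  let counts := lst.foldl (fun (d : PySem.Dict Int Int) i => d.insert i (d.getD i 0 + 1)) PySem.Dict.empty
  let st := counts.items.foldl (fun (st : Int × Int × Int) vc =>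
      if min_value ≤ vc.1 ∧ vc.1 ≤ max_value then
        (st.1 + vc.1 * vc.2, st.2.1 * vc.1 ^ vc.2.toNat, st.2.2 + vc.2)
      else st) (0, 1, 0)
  let (sum_, product) :=
    if st.2.2 = 0 then ("None", "None")
    else (PySem.Int.toStr st.1, PySem.Int.toStr st.2.1)
  "sum_ = " ++ sum_ ++ "\nproduct = " ++ product

-- ===== PRECONDITION & SPEC =====
def Spec_sum_and_product (min_value : Int) (max_value : Int) (lst : List Int) (out : String) : Prop := out = sum_and_product_alt min_value max_value lst
instance (min_value : Int) (max_value : Int) (lst : List Int) (out : String) : Decidable (Spec_sum_and_product min_value max_value lst out) := by unfold Spec_sum_and_product; infer_instance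

-- ===== CLAIM (what is proved, stated in full; the proofs are below) =====
def Claim_equal_sum_and_product : Prop := ∀ (min_value : Int) (max_value : Int) (lst : List Int), Dom_sum_and_product min_value max_value lst → Spec_sum_and_product min_value max_value lst (sum_and_product min_value max_value lst)

-- ===== LEMMAS AND PROOFS =====

-- the items fold decomposes into three independent map-sums/products over the key list
theorem pv_fold_items (min_value max_value : Int) (xs : List Int) (ks : List Int) (s pr c : Int) :
    (ks.map (fun k => (k, (xs.count k : Int)))).foldl (fun (st : Int × Int × Int) vc =>
        if min_value ≤ vc.1 ∧ vc.1 ≤ max_value then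
          (st.1 + vc.1 * vc.2, st.2.1 * vc.1 ^ vc.2.toNat, st.2.2 + vc.2)
        else st) (s, pr, c)
    = (s + (ks.map (fun k => if min_value ≤ k ∧ k ≤ max_value then k * (xs.count k : Int) else 0)).sum,
       pr * (ks.map (fun k => if min_value ≤ k ∧ k ≤ max_value then k ^ xs.count k else 1)).prod,
       c + (ks.map (fun k => if min_value ≤ k ∧ k ≤ max_value then (xs.count k : Int) else 0)).sum) := by
  induction ks generalizing s pr c with
  | nil => simp
  | cons k kt ih =>
    by_cases h : min_value ≤ k ∧ k ≤ max_value
    · simp only [List.map_cons, List.foldl_cons, if_pos h, ih, List.sum_cons, List.prod_cons,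
        Int.toNat_natCast]
      refine Prod.ext ?_ (Prod.ext ?_ ?_) <;> simp <;> ring
    · simp only [List.map_cons, List.foldl_cons, if_neg h, ih, List.sum_cons, List.prod_cons]
      simp

-- the per-distinct-value sum over any superset of xs's values is the filtered sum
theorem pv_sum (min_value max_value : Int) (xs : List Int) (s : Finset Int)
    (h : ∀ y ∈ xs, y ∈ s) :
    (∑ k ∈ s, if min_value ≤ k ∧ k ≤ max_value then k * (xs.count k : Int) else 0)
    = (xs.filter (fun i => decide (min_value ≤ i ∧ i ≤ max_value))).sum := by
  induction xs with
  | nil => simp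
  | cons x t ih =>
    have hx : x ∈ s := h x (by simp)
    have ht : ∀ y ∈ t, y ∈ s := fun y hy => h y (by simp [hy])
    have hsplit : ∀ k ∈ s,
        (if min_value ≤ k ∧ k ≤ max_value then k * (((x :: t).count k : Int)) else 0)
        = (if min_value ≤ k ∧ k ≤ max_value then k * (t.count k : Int) else 0)
          + (if k = x then (if min_value ≤ x ∧ x ≤ max_value then x else 0) else 0) := by
      intro k _
      by_cases hk : k = x
      · subst hk; simp [List.count_cons_self]; split_ifs <;> push_cast <;> ring
      · have hk' : x ≠ k := fun h' => hk h'.symm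
        simp [hk, hk']
    rw [Finset.sum_congr rfl hsplit, Finset.sum_add_distrib, ih ht,
      Finset.sum_ite_eq' s x (fun _ => if min_value ≤ x ∧ x ≤ max_value then x else 0),
      if_pos hx]
    by_cases hp : min_value ≤ x ∧ x ≤ max_value
    · simp [hp]; ring
    · simp [hp]

-- the per-distinct-value product of powers over any superset of xs's values is the filtered product
theorem pv_prod (min_value max_value : Int) (xs : List Int) (s : Finset Int)
    (h : ∀ y ∈ xs, y ∈ s) :
    (∏ k ∈ s, if min_value ≤ k ∧ k ≤ max_value then k ^ xs.count k else 1)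
    = (xs.filter (fun i => decide (min_value ≤ i ∧ i ≤ max_value))).prod := by
  induction xs with
  | nil => simp
  | cons x t ih =>
    have hx : x ∈ s := h x (by simp)
    have ht : ∀ y ∈ t, y ∈ s := fun y hy => h y (by simp [hy])
    have hsplit : ∀ k ∈ s,
        (if min_value ≤ k ∧ k ≤ max_value then k ^ ((x :: t).count k) else 1)
        = (if min_value ≤ k ∧ k ≤ max_value then k ^ t.count k else 1)
          * (if k = x then (if min_value ≤ x ∧ x ≤ max_value then x else 1) else 1) := by
      intro k _
      by_cases hk : k = x
      · subst hk; simp [List.count_cons_self]; split_ifs <;> ring_nf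
      · have hk' : x ≠ k := fun h' => hk h'.symm
        simp [hk, hk']
    rw [Finset.prod_congr rfl hsplit, Finset.prod_mul_distrib, ih ht,
      Finset.prod_ite_eq' s x (fun _ => if min_value ≤ x ∧ x ≤ max_value then x else 1),
      if_pos hx]
    by_cases hp : min_value ≤ x ∧ x ≤ max_value
    · simp [hp]; ring
    · simp [hp]

-- the per-distinct-value count sum over any superset of xs's values is the filtered length
theorem pv_len (min_value max_value : Int) (xs : List Int) (s : Finset Int)
    (h : ∀ y ∈ xs, y ∈ s) :
    (∑ k ∈ s, if min_value ≤ k ∧ k ≤ max_value then (xs.count k : Int) else 0)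
    = ((xs.filter (fun i => decide (min_value ≤ i ∧ i ≤ max_value))).length : Int) := by
  induction xs with
  | nil => simp
  | cons x t ih =>
    have hx : x ∈ s := h x (by simp)
    have ht : ∀ y ∈ t, y ∈ s := fun y hy => h y (by simp [hy])
    have hsplit : ∀ k ∈ s,
        (if min_value ≤ k ∧ k ≤ max_value then (((x :: t).count k : Int)) else 0)
        = (if min_value ≤ k ∧ k ≤ max_value then (t.count k : Int) else 0)
          + (if k = x then (if min_value ≤ x ∧ x ≤ max_value then (1 : Int) else 0) else 0) := by
      intro k _
      by_cases hk : k = x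
      · subst hk; simp [List.count_cons_self]; split_ifs <;> push_cast <;> ring
      · have hk' : x ≠ k := fun h' => hk h'.symm
        simp [hk, hk']
    rw [Finset.sum_congr rfl hsplit, Finset.sum_add_distrib, ih ht,
      Finset.sum_ite_eq' s x (fun _ => if min_value ≤ x ∧ x ≤ max_value then (1 : Int) else 0),
      if_pos hx]
    by_cases hp : min_value ≤ x ∧ x ≤ max_value
    · simp [hp]
    · simp [hp]

-- ===== VERDICT (by name: the statement is the Claim_ definition above) =====
theorem sum_and_product_spec : Claim_equal_sum_and_product := by
  intro min_value max_value lst _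
  unfold Spec_sum_and_product sum_and_product sum_and_product_alt
  simp only [PySem.Dict.foldl_insert_getD_add_one_eq_counter, PySem.Dict.items_counter,
    pv_fold_items]
  set ks := PySem.Set.ofList lst with hks
  have hnd : (ks : List Int).Nodup := PySem.Set.nodup_ofList lst
  have hmem : ∀ y ∈ lst, y ∈ ks := fun y hy => (PySem.Set.mem_ofList lst y).2 hy
  have hmemF : ∀ y ∈ lst, y ∈ (ks : List Int).toFinset := fun y hy => List.mem_toFinset.2 (hmem y hy)
  have hA : ∀ (i : Int), (decide (i ≥ min_value) && decide (i ≤ max_value))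
      = decide (min_value ≤ i ∧ i ≤ max_value) := by
    intro i; simp [ge_iff_le, Bool.decide_and]
  have hfa : lst.filter (fun i => decide (i ≥ min_value) && decide (i ≤ max_value))
      = lst.filter (fun i => decide (min_value ≤ i ∧ i ≤ max_value)) := by
    simp only [hA]
  have hsum := pv_sum min_value max_value lst (ks : List Int).toFinset hmemF
  have hprod := pv_prod min_value max_value lst (ks : List Int).toFinset hmemF
  have hlen := pv_len min_value max_value lst (ks : List Int).toFinset hmemF
  rw [List.sum_toFinset _ hnd] at hsum hlen
  rw [List.prod_toFinset _ hnd] at hprod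
  rw [hfa, hsum, hprod, hlen]
  simp only [zero_add, one_mul]
  rcases hF : lst.filter (fun i => decide (min_value ≤ i ∧ i ≤ max_value)) with _ | ⟨y, ys⟩
  · simp
  · have h1 : ((ys.length : Int) + 1) ≠ 0 := by omega
    simp [h1]
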